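-- pv_equiv track=rewrite | github.com/PedroDRodrigues/FP_Project_2 | FP_2122_Projeto_1.py | corrigir_palavra
-- ===== SOURCE A (Python) =====
-- def corrigir_palavra(str1):
--     first_pointer = 0
--     second_pointer = 1
--
--     while second_pointer != len(str1) and len(str1) > 0:
--         if (abs(ord(str1[first_pointer]) - ord(str1[second_pointer])) == 32):
--             str1 = str1[:first_pointer] + str1[second_pointer + 1:]
--             first_pointer = 0
--             second_pointer = 1
--         else:
--             first_pointer += 1
--             second_pointer += 1
--
--     return str1
-- ===== SOURCE B (Python) =====
-- def corrigir_palavra(str1):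
--     stack = []
--     for c in str1:
--         if stack and abs(ord(stack[-1]) - ord(c)) == 32:
--             stack.pop()
--         else:
--             stack.append(c)
--     return "".join(stack)
-- ===== Notes on version B (the rewrite author's own statement) =====
-- stated objective: faster
-- what changed: Replaced the restart-from-zero scan-and-slice loop with a single-pass stack reduction that pops the top when it matches the incoming char.
import Mathlib
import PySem

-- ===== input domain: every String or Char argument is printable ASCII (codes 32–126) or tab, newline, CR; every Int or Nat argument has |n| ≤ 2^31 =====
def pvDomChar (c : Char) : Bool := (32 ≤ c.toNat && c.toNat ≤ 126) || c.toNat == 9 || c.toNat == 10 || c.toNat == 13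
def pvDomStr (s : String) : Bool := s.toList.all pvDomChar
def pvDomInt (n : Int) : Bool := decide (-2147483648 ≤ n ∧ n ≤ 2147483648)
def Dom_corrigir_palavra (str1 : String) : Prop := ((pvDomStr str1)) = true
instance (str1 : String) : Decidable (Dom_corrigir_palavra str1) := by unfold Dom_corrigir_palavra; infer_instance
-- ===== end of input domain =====

-- B replaces A's quadratic restart-from-zero scan-and-slice loop with a single
-- left-to-right stack pass (pop when the top and the incoming char differ by 32).

-- shared helper: Python's `abs(ord(x) - ord(y)) == 32`
def pvMatch (a b : Char) : Bool := ((a.toNat : Int) - (b.toNat : Int)).natAbs == 32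

-- ===== PORT A =====
-- A's while-loop over the state (str1, first_pointer, second_pointer), step for step.
-- `fuel` is only a totality guard for the while loop (the loop always terminates, and
-- corrigir_palavra supplies enough fuel — proved in pv_fuel_enough below); the
-- `| _, _ => l` branch is a totality guard for the indexing `str1[fp]`/`str1[sp]`
-- (indices are always in range when reached).
def pvLoopA (fuel : Nat) (l : List Char) (fp sp : Nat) : List Char :=
  match fuel with
  | 0 => l
  | fuel + 1 =>
    if sp ≠ l.length ∧ 0 < l.length then
      match l[fp]?, l[sp]? with
      | some a, some b =>
        if pvMatch a b then
          pvLoopA fuel (l.take fp ++ l.drop (sp + 1)) 0 1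
        else
          pvLoopA fuel l (fp + 1) (sp + 1)
      | _, _ => l
    else l

def corrigir_palavra (str1 : String) : String :=
  String.mk (pvLoopA ((str1.toList.length + 1) * (str1.toList.length + 1)) str1.toList 0 1)

-- ===== PORT B =====
-- one step of Source B's loop body; the stack is kept top-first, so Source B's
-- stack[-1] is the head and append/pop are cons/tail; join reverses it back.
def pvStep (st : List Char) (c : Char) : List Char :=
  match st with
  | [] => [c]
  | t :: rest => if pvMatch t c then rest else c :: t :: rest

def corrigir_palavra_alt (str1 : String) : String :=
  String.mk ((str1.toList.foldl pvStep []).reverse)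

-- ===== PRECONDITION & SPEC =====
def Spec_corrigir_palavra (str1 : String) (out : String) : Prop := out = corrigir_palavra_alt str1
instance (str1 : String) (out : String) : Decidable (Spec_corrigir_palavra str1 out) := by unfold Spec_corrigir_palavra; infer_instance

-- ===== CLAIM (what is proved, stated in full; the proofs are below) =====
def Claim_equal_corrigir_palavra : Prop := ∀ (str1 : String), Dom_corrigir_palavra str1 → Spec_corrigir_palavra str1 (corrigir_palavra str1)

-- ===== LEMMAS AND PROOFS =====

-- no-match relation between adjacent characters
def pvNM (a b : Char) : Prop := pvMatch a b = false

-- unfolding equations for A's loop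
theorem pvLoopA_some (fuel : Nat) (l : List Char) (fp : Nat) (a b : Char)
    (hc : fp + 1 ≠ l.length ∧ 0 < l.length)
    (ha : l[fp]? = some a) (hb : l[fp + 1]? = some b) :
    pvLoopA (fuel + 1) l fp (fp + 1) =
      if pvMatch a b then pvLoopA fuel (l.take fp ++ l.drop (fp + 1 + 1)) 0 1
      else pvLoopA fuel l (fp + 1) (fp + 1 + 1) := by
  rw [pvLoopA, if_pos hc]
  split
  · next a' b' ha' hb' =>
    rw [ha] at ha'; rw [hb] at hb'
    injection ha' with h1; injection hb' with h2
    subst h1; subst h2; rfl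
  · next h =>
    exact (h a b ha hb).elim

theorem pvLoopA_none (fuel : Nat) (l : List Char) (fp : Nat)
    (hc : fp + 1 ≠ l.length ∧ 0 < l.length)
    (hn : ∀ (a b : Char), l[fp]? = some a → l[fp + 1]? = some b → False) :
    pvLoopA (fuel + 1) l fp (fp + 1) = l := by
  rw [pvLoopA, if_pos hc]
  split
  · next a' b' ha' hb' => exact (hn a' b' ha' hb').elim
  · rfl

theorem pvLoopA_stop (fuel : Nat) (l : List Char) (fp : Nat)
    (hc : ¬(fp + 1 ≠ l.length ∧ 0 < l.length)) :
    pvLoopA (fuel + 1) l fp (fp + 1) = l := by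
  rw [pvLoopA, if_neg hc]

-- Running B's fold over a block u with stack s, when the list s.reverse ++ u has no
-- adjacent match, only pushes: the result is u.reverse ++ s.
theorem pv_fold_push (u : List Char) : ∀ (s : List Char),
    List.IsChain pvNM (s.reverse ++ u) → List.foldl pvStep s u = u.reverse ++ s := by
  induction u with
  | nil => intro s _; simp
  | cons c u' ih =>
    intro s hch
    have hstep : pvStep s c = c :: s := by
      cases s with
      | nil => rfl
      | cons t rest =>
        have h' : List.IsChain pvNM (rest.reverse ++ [t]) ∧ pvNM t c ∧
            List.IsChain pvNM (c :: u') := by simpa using hch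
        simp only [pvStep]
        rw [if_neg]
        simpa [pvNM] using h'.2.1
    rw [List.foldl_cons, hstep]
    have hch' : List.IsChain pvNM ((c :: s).reverse ++ u') := by
      have heq : (c :: s).reverse ++ u' = s.reverse ++ c :: u' := by simp
      rw [heq]; exact hch
    rw [ih (c :: s) hch']
    simp

-- A list with no adjacent match is a fixed point of B's reduction.
theorem pv_red_irred (l : List Char) (h : List.IsChain pvNM l) :
    (List.foldl pvStep [] l).reverse = l := by
  rw [pv_fold_push l [] (by simpa using h)]; simp

-- Deleting the leftmost matching pair does not change B's result.
theorem pv_fold_delete (u : List Char) (a b : Char) (v : List Char)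
    (hu : List.IsChain pvNM (u ++ [a])) (hab : pvMatch a b = true) :
    List.foldl pvStep [] (u ++ a :: b :: v) = List.foldl pvStep [] (u ++ v) := by
  have hu' : List.IsChain pvNM u := (List.isChain_append.mp hu).1
  have hfu : List.foldl pvStep [] u = u.reverse := by
    simpa using pv_fold_push u [] (by simpa using hu')
  have hpush : pvStep u.reverse a = a :: u.reverse := by
    cases hur : u.reverse with
    | nil => rfl
    | cons t rest =>
      have ht : t ∈ u.getLast? := by
        have hu2 : u = rest.reverse ++ [t] := by
          have := congrArg List.reverse hur; simpa using this
        rw [hu2]; simp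
      have hj := (List.isChain_append.mp hu).2.2 t ht a (by simp)
      simp only [pvStep]
      rw [if_neg]
      simpa [pvNM] using hj
  have hpop : pvStep (a :: u.reverse) b = u.reverse := by
    simp [pvStep, hab]
  rw [List.foldl_append, hfu, List.foldl_cons, hpush, List.foldl_cons, hpop,
      List.foldl_append, hfu]

-- a list of length ≤ 1 is trivially a chain
theorem pv_chain_short (l : List Char) (h : l.length ≤ 1) : List.IsChain pvNM l := by
  cases l with
  | nil => simp
  | cons x xs =>
    cases xs with
    | nil => simp
    | cons y ys => simp at h

-- Main invariant: with enough fuel, if the prefix of l up to and including position fp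
-- has no adjacent match, A's loop from (fp, fp + 1) computes B's reduction of l.
theorem pv_loopA_eq_red : ∀ (fuel : Nat) (l : List Char) (fp : Nat),
    l.length * l.length + (l.length - fp) + 1 ≤ fuel →
    List.IsChain pvNM (l.take (fp + 1)) →
    pvLoopA fuel l fp (fp + 1) = (List.foldl pvStep [] l).reverse := by
  intro fuel
  induction fuel with
  | zero => intro l fp hf; omega
  | succ fuel ih =>
    intro l fp hf hch
    by_cases hc : fp + 1 ≠ l.length ∧ 0 < l.length
    · cases hfa : l[fp]? with
      | none =>
        have hlen : l.length ≤ fp := List.getElem?_eq_none_iff.mp hfa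
        rw [pvLoopA_none fuel l fp hc (fun a b ha _ => by rw [hfa] at ha; cases ha)]
        rw [List.take_of_length_le (by omega)] at hch
        exact (pv_red_irred l hch).symm
      | some a =>
        cases hfb : l[fp + 1]? with
        | none =>
          have hlen : l.length ≤ fp + 1 := List.getElem?_eq_none_iff.mp hfb
          rw [pvLoopA_none fuel l fp hc (fun a b _ hb => by rw [hfb] at hb; cases hb)]
          rw [List.take_of_length_le hlen] at hch
          exact (pv_red_irred l hch).symm
        | some b =>
          have hfalt : fp < l.length := (List.getElem?_eq_some_iff.mp hfa).1
          have hfblt : fp + 1 < l.length := (List.getElem?_eq_some_iff.mp hfb).1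
          have htk : l.take (fp + 1) = l.take fp ++ [a] := by
            rw [List.take_add_one, hfa]; rfl
          rw [pvLoopA_some fuel l fp a b hc hfa hfb]
          by_cases hm : pvMatch a b
          · rw [if_pos hm]
            have hlen2 : (l.take fp ++ l.drop (fp + 1 + 1)).length = l.length - 2 := by
              simp only [List.length_append, List.length_take, List.length_drop]
              omega
            have hfuel2 : (l.take fp ++ l.drop (fp + 1 + 1)).length *
                (l.take fp ++ l.drop (fp + 1 + 1)).length +
                ((l.take fp ++ l.drop (fp + 1 + 1)).length - 0) + 1 ≤ fuel := by
              rw [hlen2]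
              obtain ⟨m, hm2⟩ : ∃ m, l.length = m + 2 := ⟨l.length - 2, by omega⟩
              have hsq : l.length * l.length = m * m + 4 * m + 4 := by rw [hm2]; ring
              rw [show l.length - 2 = m by omega]
              rw [hsq] at hf
              generalize m * m = K at hf ⊢
              omega
            rw [ih _ 0 hfuel2 (pv_chain_short _ (by simp))]
            have hdec : l = l.take fp ++ a :: b :: l.drop (fp + 2) := by
              have h1 : l.drop fp = a :: l.drop (fp + 1) := by
                rw [List.drop_eq_getElem_cons hfalt]
                simp [(List.getElem?_eq_some_iff.mp hfa).2]
              have h2 : l.drop (fp + 1) = b :: l.drop (fp + 2) := by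
                rw [List.drop_eq_getElem_cons hfblt]
                simp [(List.getElem?_eq_some_iff.mp hfb).2]
              conv_lhs => rw [← List.take_append_drop fp l, h1, h2]
            have hfold : List.foldl pvStep [] l
                = List.foldl pvStep [] (l.take fp ++ l.drop (fp + 2)) := by
              conv_lhs => rw [hdec]
              exact pv_fold_delete _ a b _ (htk ▸ hch) hm
            rw [← hfold]
          · rw [if_neg hm]
            have htk2 : l.take (fp + 1 + 1) = l.take (fp + 1) ++ [b] := by
              rw [List.take_add_one, hfb]; rfl
            have hch2 : List.IsChain pvNM (l.take (fp + 1 + 1)) := by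
              rw [htk2]
              refine List.IsChain.append hch (by simp) ?_
              intro x hx y hy
              have hxa : x = a := by
                rw [htk] at hx; simp at hx; exact hx.symm
              have hyb : y = b := by simp at hy; exact hy.symm
              subst hxa; subst hyb
              simpa [pvNM] using hm
            have hfuel2 : l.length * l.length + (l.length - (fp + 1)) + 1 ≤ fuel := by
              generalize l.length * l.length = K at hf ⊢
              omega
            exact ih l (fp + 1) hfuel2 hch2
    · rw [pvLoopA_stop fuel l fp hc]
      have hlen : l.length ≤ fp + 1 := by
        rcases not_and_or.mp hc with h | h
        · omega
        · omega
      rw [List.take_of_length_le hlen] at hch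
      exact (pv_red_irred l hch).symm

-- ===== VERDICT (by name: the statement is the Claim_ definition above) =====
theorem corrigir_palavra_spec : Claim_equal_corrigir_palavra := by
  intro str1 _
  unfold Spec_corrigir_palavra corrigir_palavra corrigir_palavra_alt
  rw [pv_loopA_eq_red ((str1.toList.length + 1) * (str1.toList.length + 1)) str1.toList 0
    (by generalize hL : str1.toList.length = L
        have : (L + 1) * (L + 1) = L * L + 2 * L + 1 := by ring
        generalize L * L = K at this ⊢
        omega)
    (pv_chain_short _ (by simp))]
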